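-- pv_equiv track=rewrite | github.com/leporis/Works | Lecture/IoT_and_BigData/Week_1/build.py | insert_after_text
-- ===== SOURCE A (Python) =====
-- def insert_after_text(content, text_match, img_md):
--     lines = content.split('\n')
--     result = []
--     inserted = False
--     for line in lines:
--         result.append(line)
--         if not inserted and text_match in line:
--             result.append('')
--             result.append(img_md)
--             result.append('')
--             inserted = True
--     return '\n'.join(result)
-- ===== SOURCE B (Python) =====
-- def insert_after_text(content, text_match, img_md):
--     lines = content.split('\n')
--     i = next((j for j, l in enumerate(lines) if text_match in l), None)
--     if i is None:
--         return '\n'.join(lines)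
--     return '\n'.join(lines[:i + 1] + ['', img_md, ''] + lines[i + 1:])
-- ===== Notes on version B (the rewrite author's own statement) =====
-- stated objective: simpler
-- what changed: Replaces the flag-driven loop that re-assembles every line with an up-front search for the first matching line's index followed by a single list splice.
import Mathlib
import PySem

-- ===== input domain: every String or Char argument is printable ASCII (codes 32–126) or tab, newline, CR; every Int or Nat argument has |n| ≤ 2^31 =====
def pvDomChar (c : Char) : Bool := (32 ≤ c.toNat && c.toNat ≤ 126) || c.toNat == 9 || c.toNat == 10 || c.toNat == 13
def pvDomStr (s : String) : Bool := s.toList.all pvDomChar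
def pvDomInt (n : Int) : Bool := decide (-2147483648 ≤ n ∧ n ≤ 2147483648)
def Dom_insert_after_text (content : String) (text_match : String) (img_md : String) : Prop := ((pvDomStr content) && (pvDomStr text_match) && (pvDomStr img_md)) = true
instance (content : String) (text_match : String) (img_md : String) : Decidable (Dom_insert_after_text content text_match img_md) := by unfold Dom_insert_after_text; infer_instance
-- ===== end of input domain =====

-- B replaces A's flag-driven accumulate-every-line loop with an up-front search for the
-- first matching line's index and a single splice (objective: simpler).

-- ===== PORT A =====
-- the loop body: append the line; if not yet inserted and text_match in line, append '', img_md, ''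
def insertStepA (text_match : String) (img_md : String)
    (st : List String × Bool) (line : String) : List String × Bool :=
  let r := st.1 ++ [line]
  if !st.2 && PySem.Str.isIn text_match line then
    (r ++ ["", img_md, ""], true)
  else
    (r, st.2)

def insert_after_text (content : String) (text_match : String) (img_md : String) : String :=
  let lines := (PySem.Str.split? content "\n").getD []
  let st := lines.foldl (insertStepA text_match img_md) ([], false)
  PySem.Str.join "\n" st.1

-- ===== PORT B =====
def insert_after_text_alt (content : String) (text_match : String) (img_md : String) : String :=
  let lines := (PySem.Str.split? content "\n").getD []
  match lines.findIdx? (fun l => PySem.Str.isIn text_match l) with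
  | none => PySem.Str.join "\n" lines
  | some i => PySem.Str.join "\n" (lines.take (i + 1) ++ ["", img_md, ""] ++ lines.drop (i + 1))

-- ===== PRECONDITION & SPEC =====
def Spec_insert_after_text (content : String) (text_match : String) (img_md : String) (out : String) : Prop := out = insert_after_text_alt content text_match img_md
instance (content : String) (text_match : String) (img_md : String) (out : String) : Decidable (Spec_insert_after_text content text_match img_md out) := by unfold Spec_insert_after_text; infer_instance

-- ===== CLAIM (what is proved, stated in full; the proofs are below) =====
def Claim_equal_insert_after_text : Prop := ∀ (content : String) (text_match : String) (img_md : String), Dom_insert_after_text content text_match img_md → Spec_insert_after_text content text_match img_md (insert_after_text content text_match img_md)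

-- ===== LEMMAS AND PROOFS =====

-- once inserted = true, the loop just appends every remaining line
theorem loopA_true (text_match img_md : String) :
    ∀ (ls : List String) (acc : List String),
      ls.foldl (insertStepA text_match img_md) (acc, true) = (acc ++ ls, true) := by
  intro ls
  induction ls with
  | nil => intro acc; simp
  | cons l ls ih =>
    intro acc
    simp only [List.foldl_cons, insertStepA, Bool.not_true, Bool.false_and,
      Bool.false_eq_true, if_false]
    rw [ih]
    simp

-- with inserted = false, the loop computes acc ++ (B's splice of the remaining lines)
theorem loopA_false (text_match img_md : String) :
    ∀ (ls : List String) (acc : List String),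
      (ls.foldl (insertStepA text_match img_md) (acc, false)).1 =
        acc ++ (match ls.findIdx? (fun l => PySem.Str.isIn text_match l) with
                | none => ls
                | some i => ls.take (i + 1) ++ ["", img_md, ""] ++ ls.drop (i + 1)) := by
  intro ls
  induction ls with
  | nil => intro acc; simp
  | cons l ls ih =>
    intro acc
    by_cases h : PySem.Str.isIn text_match l = true
    · simp only [List.foldl_cons, insertStepA, Bool.not_false, Bool.true_and, h, if_true]
      rw [loopA_true]
      have h' : PySem.Chars.isIn text_match.toList l.toList = true := by simpa using h
      simp [List.findIdx?_cons, h']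
    · simp only [List.foldl_cons, insertStepA, Bool.not_false, Bool.true_and, h,
        Bool.false_eq_true, if_false]
      rw [ih]
      rw [List.findIdx?_cons]
      simp only [h, Bool.false_eq_true, if_false]
      cases hf : ls.findIdx? (fun l => PySem.Str.isIn text_match l) with
      | none => simp
      | some i => simp [List.take_succ_cons, List.drop_succ_cons]

-- ===== VERDICT (by name: the statement is the Claim_ definition above) =====
theorem insert_after_text_spec : Claim_equal_insert_after_text := by
  intro content text_match img_md _
  unfold Spec_insert_after_text insert_after_text insert_after_text_alt
  simp only []
  rw [loopA_false text_match img_md ((PySem.Str.split? content "\n").getD []) []]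
  cases hf : ((PySem.Str.split? content "\n").getD []).findIdx? (fun l => PySem.Str.isIn text_match l) with
  | none => simp
  | some i => simp
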